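-- pv_equiv track=rewrite | github.com/drandrewthomas/Python3-3D-photos-utilities-and-library | photos3d/jpegtool.py | __bytes2string__
-- ===== SOURCE A (Python) =====
-- def __bytes2string__(bstr, chnull="[NULL]"):
--     astr = ""
--     for c in range(0, len(bstr)):
--         if bstr[c] == 0:
--             astr = astr + chnull
--         else:
--             astr = astr + chr(bstr[c])
--     return astr
-- ===== SOURCE B (Python) =====
-- def __bytes2string__(bstr, chnull="[NULL]"):
--     return "".join(map(chr, bstr)).replace("\x00", chnull)
-- ===== Notes on version B (the rewrite author's own statement) =====
-- stated objective: idiomatic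
-- what changed: Replaces the index loop with per-element branch and repeated string concatenation by two bulk operations: build the whole string with ''.join(map(chr, bstr)) and substitute nulls with one .replace('\x00', chnull).
import Mathlib
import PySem

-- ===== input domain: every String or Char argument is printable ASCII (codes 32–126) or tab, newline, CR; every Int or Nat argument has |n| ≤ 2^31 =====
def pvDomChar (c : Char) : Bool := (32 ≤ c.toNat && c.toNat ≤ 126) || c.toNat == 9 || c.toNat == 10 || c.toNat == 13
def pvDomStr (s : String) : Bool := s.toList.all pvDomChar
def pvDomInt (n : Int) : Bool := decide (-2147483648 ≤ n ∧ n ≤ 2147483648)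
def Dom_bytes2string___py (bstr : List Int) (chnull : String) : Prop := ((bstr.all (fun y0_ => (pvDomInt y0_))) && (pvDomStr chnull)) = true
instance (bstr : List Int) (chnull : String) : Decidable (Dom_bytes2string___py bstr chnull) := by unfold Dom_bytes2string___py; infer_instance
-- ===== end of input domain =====

-- B builds the whole string in one bulk map+join and substitutes nulls with one replace,
-- instead of A's index loop with a per-element branch and repeated concatenation (objective: idiomatic).

-- ===== PORT A =====
-- chr(b) on a valid code point (Pre_ guarantees it) is Char.ofNat b.toNat, exact there.
def bytes2string___py (bstr : List Int) (chnull : String) : String :=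
  (PySem.List.pyRange 0 bstr.length 1).foldl
    (fun astr c =>
      if PySem.List.pyGetD bstr c 0 == 0 then astr ++ chnull
      else astr ++ (Char.ofNat (PySem.List.pyGetD bstr c 0).toNat).toString) ""

-- ===== PORT B =====
def bytes2string___py_alt (bstr : List Int) (chnull : String) : String :=
  PySem.Str.replace (String.ofList (bstr.map (fun b => Char.ofNat b.toNat))) "\x00" chnull

-- ===== PRECONDITION & SPEC =====
-- Pre_ excludes elements on which chr raises ValueError (negative or ≥ 0x110000) and, narrower
-- than A's domain, the surrogate code points 0xD800–0xDFFF: there A returns a lone-surrogate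
-- Python str that is not representable as a Lean String (Char excludes surrogates).
def Pre_bytes2string___py (bstr : List Int) (chnull : String) : Prop :=
  ∀ b ∈ bstr, 0 ≤ b ∧ (b < 55296 ∨ (57344 ≤ b ∧ b < 1114112))
instance (bstr : List Int) (chnull : String) : Decidable (Pre_bytes2string___py bstr chnull) := by
  unfold Pre_bytes2string___py; infer_instance
def pvWitness_bytes2string___py : List Int × String := ([0, 72, 105, 0, 10], "[NULL]")
def Spec_bytes2string___py (bstr : List Int) (chnull : String) (out : String) : Prop := out = bytes2string___py_alt bstr chnull
instance (bstr : List Int) (chnull : String) (out : String) : Decidable (Spec_bytes2string___py bstr chnull out) := by unfold Spec_bytes2string___py; infer_instance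

-- ===== CLAIM (what is proved, stated in full; the proofs are below) =====
def Claim_equal_bytes2string___py : Prop := ∀ (bstr : List Int) (chnull : String), Dom_bytes2string___py bstr chnull → Pre_bytes2string___py bstr chnull → Spec_bytes2string___py bstr chnull (bytes2string___py bstr chnull)

-- ===== LEMMAS AND PROOFS =====

-- the common flat form: each element contributes chnull (if 0) or its character
def pvPiece (chnull : String) (b : Int) : List Char :=
  if b = 0 then chnull.toList else [Char.ofNat b.toNat]

theorem pvGo_single (c0 : Char) (new : List Char) :
    ∀ (fuel : Nat) (l acc : List Char), l.length ≤ fuel →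
      PySem.Chars.replace.go [c0] new fuel l acc =
        acc.reverse ++ l.flatMap (fun c => if c = c0 then new else [c]) := by
  intro fuel
  induction fuel with
  | zero =>
    intro l acc h
    have : l = [] := List.eq_nil_of_length_eq_zero (Nat.le_zero.mp h)
    subst this; simp [PySem.Chars.replace.go]
  | succ n ih =>
    intro l acc h
    cases l with
    | nil => simp [PySem.Chars.replace.go]
    | cons c t =>
      by_cases hc : c = c0
      · subst hc
        have hpre : List.isPrefixOf [c] (c :: t) = true := by simp [List.isPrefixOf]
        rw [PySem.Chars.replace.go]
        simp only [hpre, if_pos]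
        rw [ih _ _ (by simpa using Nat.le_of_succ_le_succ h)]
        simp
      · have hpre : List.isPrefixOf [c0] (c :: t) = false := by
          simp [List.isPrefixOf]; intro hh; exact absurd hh.symm hc
        rw [PySem.Chars.replace.go]
        simp only [hpre]
        rw [if_neg (by simp)]
        rw [ih _ _ (by simpa using Nat.le_of_succ_le_succ h)]
        simp [hc]

theorem pvReplace_single (s new : List Char) (c0 : Char) :
    PySem.Chars.replace s [c0] new =
      s.flatMap (fun c => if c = c0 then new else [c]) := by
  rw [PySem.Chars.replace]
  simp only [List.isEmpty_cons, Bool.false_eq_true, if_false]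
  exact pvGo_single c0 new s.length s [] le_rfl

theorem pvToNat_ofNat {n : Nat} (h : Nat.isValidChar n) : (Char.ofNat n).toNat = n := by
  simp [Char.ofNat, h, Char.ofNatAux, Char.toNat]

theorem pvFoldl_toList (bstr : List Int) (chnull : String) :
    ∀ acc : String,
      (bstr.foldl
        (fun astr b => if b == 0 then astr ++ chnull
          else astr ++ (Char.ofNat b.toNat).toString) acc).toList
        = acc.toList ++ bstr.flatMap (pvPiece chnull) := by
  induction bstr with
  | nil => intro acc; simp
  | cons b t ih =>
    intro acc
    simp only [List.foldl_cons, List.flatMap_cons]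
    by_cases hb : b = 0
    · subst hb
      rw [if_pos (by simp)]
      rw [ih]
      simp [pvPiece]
    · rw [if_neg (by simp [hb])]
      rw [ih]
      simp [pvPiece, hb, Char.toString]

theorem bytes2string___py_eq (bstr : List Int) (chnull : String) :
    (bytes2string___py bstr chnull).toList = bstr.flatMap (pvPiece chnull) := by
  unfold bytes2string___py
  have h := PySem.List.foldl_pyRange_pyGetD (xs := bstr) (d := (0 : Int))
    (f := fun astr b => if b == 0 then astr ++ chnull
      else astr ++ (Char.ofNat b.toNat).toString) (init := "") (a := 0) (le_refl 0)
  simp only [PySem.List.len] at h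
  rw [h]
  simpa using pvFoldl_toList bstr chnull ""

theorem bytes2string___py_alt_eq (bstr : List Int) (chnull : String)
    (hpre : Pre_bytes2string___py bstr chnull) :
    (bytes2string___py_alt bstr chnull).toList = bstr.flatMap (pvPiece chnull) := by
  unfold bytes2string___py_alt
  rw [PySem.Str.replace]
  have h0 : ("\x00" : String).toList = ['\x00'] := by decide
  simp only [String.toList_ofList, h0]
  rw [pvReplace_single]
  rw [List.flatMap_map]
  apply List.flatMap_congr  -- pointwise equality on members
  intro b hb
  rcases hpre b hb with ⟨hnn, hrange⟩
  by_cases hb0 : b = 0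
  · subst hb0; simp [pvPiece]
  · have hvalid : Nat.isValidChar b.toNat := by
      rcases hrange with h1 | ⟨h2, h3⟩
      · exact Or.inl (by omega)
      · exact Or.inr ⟨by omega, by omega⟩
    have hne : Char.ofNat b.toNat ≠ '\x00' := by
      intro heq
      have := congrArg Char.toNat heq
      rw [pvToNat_ofNat hvalid] at this
      have : b.toNat = 0 := by simpa using this
      omega
    simp [pvPiece, hb0, hne]

-- ===== VERDICT (by name: the statement is the Claim_ definition above) =====
theorem bytes2string___py_spec : Claim_equal_bytes2string___py := by
  intro bstr chnull _ hpre
  unfold Spec_bytes2string___py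
  have h1 := bytes2string___py_eq bstr chnull
  have h2 := bytes2string___py_alt_eq bstr chnull hpre
  have : (bytes2string___py bstr chnull).toList = (bytes2string___py_alt bstr chnull).toList := by
    rw [h1, h2]
  exact String.toList_injective this
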